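/- GENERATED by farm/mkstatement.py from design/units.tsv (unit `vorbis_decode_packet_rest.COMPOSITION`) and the Specs of Vorbis/Spec/*.lean — do not edit.
   THE STATEMENT of the proof unit `vorbis_decode_packet_rest.COMPOSITION`: the function `vorbis_decode_packet_rest` (917 instructions) satisfies its contract,
   GIVEN THE STATEMENTS OF ITS 16 SEGMENTS (`Vorbis.Spec.vorbis_decode_packet_rest.Seg<k> Lay μ u₀`: what the unit `vorbis_decode_packet_rest.<k>` proves).
   No machine code is walked: `ReachVia.trans` along the segments (the exit assertion of a segment is the entry assertion of
   its successor), an induction on the loop measures. What the names mean: Vorbis/Spec/Basic.lean. The theorem to prove: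
   `theorem vorbis_decode_packet_rest_COMPOSITION_ok : Vorbis.Spec.vorbis_decode_packet_rest_COMPOSITION.Statement`. -/
import Vorbis.Spec.PacketRest
namespace Vorbis.Spec.vorbis_decode_packet_rest_COMPOSITION
open X86 X86.User Asan

/-- The statement of unit `vorbis_decode_packet_rest.COMPOSITION`. -/
def Statement : Prop :=
  ∀ (Lay : Layout) (_hLay : Lay.hi = 0x1000000) (μ : Microarch) (_hμ : UserX.MicroOK μ) (u₀ : State)
    (_h_vorbis_decode_packet_rest_1 : Vorbis.Spec.vorbis_decode_packet_rest.Seg1 Lay μ u₀)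
    (_h_vorbis_decode_packet_rest_2 : Vorbis.Spec.vorbis_decode_packet_rest.Seg2 Lay μ u₀)
    (_h_vorbis_decode_packet_rest_3 : Vorbis.Spec.vorbis_decode_packet_rest.Seg3 Lay μ u₀)
    (_h_vorbis_decode_packet_rest_4 : Vorbis.Spec.vorbis_decode_packet_rest.Seg4 Lay μ u₀)
    (_h_vorbis_decode_packet_rest_5 : Vorbis.Spec.vorbis_decode_packet_rest.Seg5 Lay μ u₀)
    (_h_vorbis_decode_packet_rest_6 : Vorbis.Spec.vorbis_decode_packet_rest.Seg6 Lay μ u₀)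
    (_h_vorbis_decode_packet_rest_7 : Vorbis.Spec.vorbis_decode_packet_rest.Seg7 Lay μ u₀)
    (_h_vorbis_decode_packet_rest_8 : Vorbis.Spec.vorbis_decode_packet_rest.Seg8 Lay μ u₀)
    (_h_vorbis_decode_packet_rest_9 : Vorbis.Spec.vorbis_decode_packet_rest.Seg9 Lay μ u₀)
    (_h_vorbis_decode_packet_rest_10 : Vorbis.Spec.vorbis_decode_packet_rest.Seg10 Lay μ u₀)
    (_h_vorbis_decode_packet_rest_11 : Vorbis.Spec.vorbis_decode_packet_rest.Seg11 Lay μ u₀)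
    (_h_vorbis_decode_packet_rest_12 : Vorbis.Spec.vorbis_decode_packet_rest.Seg12 Lay μ u₀)
    (_h_vorbis_decode_packet_rest_13 : Vorbis.Spec.vorbis_decode_packet_rest.Seg13 Lay μ u₀)
    (_h_vorbis_decode_packet_rest_14 : Vorbis.Spec.vorbis_decode_packet_rest.Seg14 Lay μ u₀)
    (_h_vorbis_decode_packet_rest_15 : Vorbis.Spec.vorbis_decode_packet_rest.Seg15 Lay μ u₀)
    (_h_vorbis_decode_packet_rest_16 : Vorbis.Spec.vorbis_decode_packet_rest.Seg16 Lay μ u₀),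
    ∀ (others : List Obj) (frames : List (Nat × FrameLayout)) (len : Nat) (Ar : Arena) (stored room : Int) (mode : Nat) (ysz : Nat → Nat), Calls Lay μ Vorbis.WayInv (Vorbis.conv u₀) Vorbis.L.vorbis_decode_packet_rest.entry (Vorbis.Spec.vorbis_decode_packet_rest.spec others frames len Ar stored room mode ysz)

end Vorbis.Spec.vorbis_decode_packet_rest_COMPOSITION
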